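-- pv_equiv track=rewrite | github.com/OMKE/CinemaApp | src/Menadzer.py | prepraviVrijeme
-- ===== SOURCE A (Python) =====
-- def prepraviVrijeme(vrijeme):
--     novoVrijemeLista = []
--     for i in vrijeme:
--
--         if i == "/" or i == "." or i == "*" or i == ":":
--             novoVrijemeLista.append("-")
--         else:
--             novoVrijemeLista.append(i)
--     prepravljenoVrijeme = "".join(novoVrijemeLista)
--
--     return prepravljenoVrijeme
-- ===== SOURCE B (Python) =====
-- def prepraviVrijeme(vrijeme):
--     return vrijeme.replace("/", "-").replace(".", "-").replace("*", "-").replace(":", "-")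
-- ===== Notes on version B (the rewrite author's own statement) =====
-- stated objective: idiomatic
-- what changed: Replaces the char-by-char loop that builds a list and joins it with four chained str.replace calls, one C-level linear scan per separator; the dash is never itself a replacement target, so the order of the scans does not matter.
import Mathlib
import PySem

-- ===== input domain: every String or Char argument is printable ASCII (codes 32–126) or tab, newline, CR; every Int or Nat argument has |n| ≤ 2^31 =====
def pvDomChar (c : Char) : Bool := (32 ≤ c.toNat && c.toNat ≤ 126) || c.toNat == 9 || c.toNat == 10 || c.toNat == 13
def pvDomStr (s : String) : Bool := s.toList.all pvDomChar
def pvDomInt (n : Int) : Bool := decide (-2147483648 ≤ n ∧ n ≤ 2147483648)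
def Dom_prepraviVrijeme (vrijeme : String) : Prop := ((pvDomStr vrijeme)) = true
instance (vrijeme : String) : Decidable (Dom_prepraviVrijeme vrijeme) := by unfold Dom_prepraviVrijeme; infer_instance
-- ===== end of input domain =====

-- B replaces A's char-by-char loop (build a list, join) with four chained str.replace scans; idiomatic, same cost.


-- ===== PORT A =====
def prepraviVrijeme (vrijeme : String) : String :=
  let novoVrijemeLista : List String :=
    vrijeme.toList.foldl
      (fun acc i =>
        if i = '/' ∨ i = '.' ∨ i = '*' ∨ i = ':' then acc ++ ["-"]
        else acc ++ [String.ofList [i]]) []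
  PySem.Str.join "" novoVrijemeLista

-- ===== PORT B =====
def prepraviVrijeme_alt (vrijeme : String) : String :=
  PySem.Str.replace (PySem.Str.replace (PySem.Str.replace (PySem.Str.replace vrijeme "/" "-") "." "-") "*" "-") ":" "-"

-- ===== PRECONDITION & SPEC =====
def Spec_prepraviVrijeme (vrijeme : String) (out : String) : Prop := out = prepraviVrijeme_alt vrijeme
instance (vrijeme : String) (out : String) : Decidable (Spec_prepraviVrijeme vrijeme out) := by unfold Spec_prepraviVrijeme; infer_instance

-- ===== CLAIM (what is proved, stated in full; the proofs are below) =====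
def Claim_equal_prepraviVrijeme : Prop := ∀ (vrijeme : String), Dom_prepraviVrijeme vrijeme → Spec_prepraviVrijeme vrijeme (prepraviVrijeme vrijeme)

-- ===== LEMMAS AND PROOFS =====

-- replacing a single-char pattern by a single char is a map
theorem replace_go_single (o n : Char) :
    ∀ (l acc : List Char) (fuel : Nat), l.length ≤ fuel →
      PySem.Chars.replace.go [o] [n] fuel l acc
        = acc.reverse ++ l.map (fun c => if c = o then n else c) := by
  intro l
  induction l with
  | nil =>
    intro acc fuel _
    cases fuel <;> simp [PySem.Chars.replace.go]
  | cons c t ih =>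
    intro acc fuel hle
    cases fuel with
    | zero => simp at hle
    | succ fuel =>
      rw [PySem.Chars.replace.go]
      by_cases h : c = o
      · subst h
        have hp : [c].isPrefixOf (c :: t) = true := by simp [List.isPrefixOf]
        rw [hp]
        simp only [if_pos, List.length_singleton, List.drop_succ_cons, List.drop_zero]
        rw [ih ([n].reverse ++ acc) fuel (by simp at hle; omega)]
        simp
      · have hp : [o].isPrefixOf (c :: t) = false := by
          simp [List.isPrefixOf]
          exact fun hh => absurd hh.symm h
        rw [hp]
        simp only [Bool.false_eq_true, if_false]
        rw [ih (c :: acc) fuel (by simpa using Nat.le_of_succ_le_succ hle)]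
        simp [h]

theorem replace_single (cs : List Char) (o n : Char) :
    PySem.Chars.replace cs [o] [n] = cs.map (fun c => if c = o then n else c) := by
  rw [PySem.Chars.replace]
  simp only [List.isEmpty, Bool.false_eq_true, if_false]
  exact replace_go_single o n cs [] cs.length le_rfl

theorem toList_map_eq (v : String) :
    (prepraviVrijeme v).toList
      = v.toList.map (fun c => if c = '/' ∨ c = '.' ∨ c = '*' ∨ c = ':' then '-' else c) := by
  unfold prepraviVrijeme
  have hfold :
      v.toList.foldl
        (fun acc i =>
          if i = '/' ∨ i = '.' ∨ i = '*' ∨ i = ':' then acc ++ ["-"]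
          else acc ++ [String.ofList [i]]) []
        = v.toList.map (fun i => if i = '/' ∨ i = '.' ∨ i = '*' ∨ i = ':' then "-" else String.ofList [i]) := by
    have hc : ∀ (acc : List String) (i : Char), i ∈ v.toList →
        (if i = '/' ∨ i = '.' ∨ i = '*' ∨ i = ':' then acc ++ ["-"] else acc ++ [String.ofList [i]])
          = acc ++ [if i = '/' ∨ i = '.' ∨ i = '*' ∨ i = ':' then "-" else String.ofList [i]] := by
      intro acc i _
      by_cases h : i = '/' ∨ i = '.' ∨ i = '*' ∨ i = ':' <;> simp [h]
    rw [PySem.List.foldl_congr_mem _ _ _ _ hc,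
      PySem.List.foldl_append_singleton_eq_map
        (fun i => if i = '/' ∨ i = '.' ∨ i = '*' ∨ i = ':' then "-" else String.ofList [i]) v.toList []]
    simp
  rw [hfold, PySem.Str.toList_join]
  have : (v.toList.map (fun i => if i = '/' ∨ i = '.' ∨ i = '*' ∨ i = ':' then "-" else String.ofList [i])).map String.toList
      = ((v.toList.map (fun c => if c = '/' ∨ c = '.' ∨ c = '*' ∨ c = ':' then '-' else c)).map (fun c => [c])) := by
    simp only [List.map_map]
    apply List.map_congr_left
    intro i _
    by_cases h : i = '/' ∨ i = '.' ∨ i = '*' ∨ i = ':' <;> simp [h]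
  rw [this]
  simpa using PySem.Chars.join_nil_singletons
    (v.toList.map (fun c => if c = '/' ∨ c = '.' ∨ c = '*' ∨ c = ':' then '-' else c))

theorem toList_alt_eq (v : String) :
    (prepraviVrijeme_alt v).toList
      = v.toList.map (fun c => if c = '/' ∨ c = '.' ∨ c = '*' ∨ c = ':' then '-' else c) := by
  unfold prepraviVrijeme_alt
  simp only [PySem.Str.toList_replace]
  have h1 : ("/" : String).toList = ['/'] := by decide
  have h2 : ("." : String).toList = ['.'] := by decide
  have h3 : ("*" : String).toList = ['*'] := by decide
  have h4 : (":" : String).toList = [':'] := by decide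
  have hd : ("-" : String).toList = ['-'] := by decide
  rw [h1, h2, h3, h4, hd]
  rw [replace_single, replace_single, replace_single, replace_single]
  simp only [List.map_map]
  apply List.map_congr_left
  intro c _
  by_cases a1 : c = '/' <;> by_cases a2 : c = '.' <;> by_cases a3 : c = '*' <;> by_cases a4 : c = ':' <;>
    simp_all

theorem prepraviVrijeme_spec : Claim_equal_prepraviVrijeme := by
  intro v _
  unfold Spec_prepraviVrijeme
  have := (toList_map_eq v).trans (toList_alt_eq v).symm
  exact String.toList_inj.mp this
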